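-- pv_equiv track=rewrite | github.com/SandorSzabolcs/einjax | core/notation.py | normalize_notation
-- ===== SOURCE A (Python) =====
-- from collections import Counter
--
-- def normalize_notation(einsum_string: str) -> str:
--     """Normalize einsum notation to always include explicit output indices.
--
--     When the einsum string has no '->', follows NumPy convention:
--     output indices = all indices appearing exactly once across all inputs,
--     sorted alphabetically.
--
--     Examples:
--         'ij,jk' -> 'ij,jk->ik'   (j appears twice, contracted)
--         'ii'    -> 'ii->'          (i appears twice, full contraction to scalar)
--         'ij'    -> 'ij->ij'        (both appear once, identity)
--
--     Args:
--         einsum_string: Einsum notation, with or without '->'.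
--
--     Returns:
--         Normalized einsum string with explicit '->' output.
--     """
--     if "->" not in einsum_string:
--         input_labels = einsum_string.split(",")
--         all_indices = "".join(input_labels)
--         counts = Counter(all_indices)
--         output_indices = "".join(sorted(c for c in counts if counts[c] == 1))
--         return einsum_string + "->" + output_indices
--     return einsum_string
-- ===== SOURCE B (Python) =====
-- def normalize_notation(einsum_string: str) -> str:
--     """Sort the concatenated indices once, then collect the run-length-1
--     characters in a single linear scan (they come out already alphabetical),
--     instead of building a Counter table and sorting its singleton keys."""
--     if "->" in einsum_string:
--         return einsum_string
--     chars = sorted("".join(einsum_string.split(",")))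
--     singles = []
--     last = None
--     single = False
--     for c in chars:
--         if c == last:
--             single = False
--         else:
--             if single:
--                 singles.append(last)
--             last = c
--             single = True
--     if single:
--         singles.append(last)
--     return einsum_string + "->" + "".join(singles)
-- ===== Notes on version B (the rewrite author's own statement) =====
-- stated objective: alternative
-- what changed: Replaces the Counter table + sort-of-singleton-keys with one sort of the concatenated indices followed by a single linear run-length scan that emits each character whose run has length 1 (already in alphabetical order).
import Mathlib
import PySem

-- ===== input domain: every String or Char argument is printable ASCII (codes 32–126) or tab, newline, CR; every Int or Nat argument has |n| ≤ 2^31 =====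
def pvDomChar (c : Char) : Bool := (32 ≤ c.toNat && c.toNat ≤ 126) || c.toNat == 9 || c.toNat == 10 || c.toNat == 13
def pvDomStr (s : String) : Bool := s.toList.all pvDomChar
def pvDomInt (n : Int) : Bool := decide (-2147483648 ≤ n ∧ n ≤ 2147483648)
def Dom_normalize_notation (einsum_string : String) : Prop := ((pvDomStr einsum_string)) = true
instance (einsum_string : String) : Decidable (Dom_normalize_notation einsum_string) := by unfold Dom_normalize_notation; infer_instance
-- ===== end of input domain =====

-- B replaces A's Counter table + sort of its singleton keys by one sort of the
-- concatenated indices followed by a single run-length scan (objective: alternative).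


-- ===== PORT A =====
def normalize_notation (einsum_string : String) : String :=
  if PySem.Str.isIn "->" einsum_string = false then  -- if "->" not in einsum_string
    let input_labels := (PySem.Str.split? einsum_string ",").getD []  -- sep "," ≠ "": split? is always some, default unreachable
    let all_indices := PySem.Str.join "" input_labels
    let counts := PySem.Dict.counter all_indices.toList  -- Counter(all_indices)
    -- "".join(sorted(c for c in counts if counts[c] == 1)); c ranges over keys, so counts[c] = counts.getD c 0
    let output_indices := PySem.List.sorted (counts.keys.filter (fun c => counts.getD c 0 == 1)) (fun c => c) false
    String.ofList (einsum_string.toList ++ '-' :: '>' :: output_indices)  -- einsum_string + "->" + output_indices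
  else einsum_string

-- ===== PORT B =====
-- loop body: state = (singles, last, single)
def nnStep (st : List Char × Option Char × Bool) (c : Char) : List Char × Option Char × Bool :=
  if st.2.1 == some c then (st.1, st.2.1, false)
  else ((if st.2.2 then st.1 ++ st.2.1.toList else st.1), some c, true)  -- single=true ⟹ last is some, so .toList appends exactly it

def normalize_notation_alt (einsum_string : String) : String :=
  if PySem.Str.isIn "->" einsum_string then einsum_string
  else
    let chars := PySem.List.sorted (PySem.Str.join "" ((PySem.Str.split? einsum_string ",").getD [])).toList (fun c => c) false
    let st := chars.foldl nnStep ([], none, false)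
    let singles := if st.2.2 then st.1 ++ st.2.1.toList else st.1  -- final 'if single: singles.append(last)'
    String.ofList (einsum_string.toList ++ '-' :: '>' :: singles)  -- einsum_string + "->" + "".join(singles)

-- ===== PRECONDITION & SPEC =====
def Spec_normalize_notation (einsum_string : String) (out : String) : Prop := out = normalize_notation_alt einsum_string
instance (einsum_string : String) (out : String) : Decidable (Spec_normalize_notation einsum_string out) := by unfold Spec_normalize_notation; infer_instance

-- ===== CLAIM (what is proved, stated in full; the proofs are below) =====
def Claim_equal_normalize_notation : Prop := ∀ (einsum_string : String), Dom_normalize_notation einsum_string → Spec_normalize_notation einsum_string (normalize_notation einsum_string)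

-- ===== LEMMAS AND PROOFS =====

-- recursive form of B's scan loop
def nnScan (last : Option Char) (single : Bool) : List Char → List Char
  | [] => if single then last.toList else []
  | c :: t =>
      if last == some c then nnScan last false t
      else (if single then last.toList else []) ++ nnScan (some c) true t

theorem foldl_nnStep (l : List Char) (out : List Char) (last : Option Char) (single : Bool) :
    (if (l.foldl nnStep (out, last, single)).2.2
      then (l.foldl nnStep (out, last, single)).1 ++ (l.foldl nnStep (out, last, single)).2.1.toList
      else (l.foldl nnStep (out, last, single)).1)
      = out ++ nnScan last single l := by
  induction l generalizing out last single with
  | nil => cases single <;> simp [nnScan]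
  | cons c t ih =>
      simp only [List.foldl_cons, nnStep, nnScan]
      cases hb : (last == some c) with
      | true =>
          simp only [if_true]
          rw [ih]
      | false =>
          simp only [Bool.false_eq_true, if_false]
          rw [ih]
          cases single <;> simp

-- the joint run-length characterisation of the scan on a sorted list, by induction on length
theorem nnScan_main : ∀ n (l : List Char), l.length ≤ n →
    (∀ b, List.Pairwise (· ≤ ·) (b :: l) →
      nnScan (some b) true l = (b :: l).filter (fun c => (b :: l).count c == 1)) ∧
    (∀ a, List.Pairwise (· ≤ ·) (a :: l) →
      nnScan (some a) false l = l.filter (fun c => c != a && l.count c == 1)) := by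
  intro n
  induction n with
  | zero =>
      intro l hl
      have : l = [] := List.eq_nil_of_length_eq_zero (Nat.le_zero.mp hl)
      subst this
      constructor
      · intro b _; simp [nnScan]
      · intro a _; simp [nnScan]
  | succ n ih =>
      intro l hl
      constructor
      · -- M2 : 'single' is true, 'last' = b just emitted into a fresh run
        intro b hp
        cases l with
        | nil => simp [nnScan]
        | cons c t =>
            have ht : t.length ≤ n := by simp only [List.length_cons] at hl; omega
            by_cases hcb : c = b
            · subst hcb
              have h3 := (ih t ht).2 c hp.tail
              simp only [nnScan, beq_self_eq_true, if_true]
              rw [h3]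
              rw [List.filter_cons_of_neg (p := fun x => List.count x (c :: c :: t) == 1) (by simp),
                  List.filter_cons_of_neg (p := fun x => List.count x (c :: c :: t) == 1) (by simp)]
              exact (List.filter_congr (fun x hx => by
                by_cases hxc : x = c
                · subst hxc; simp
                · have hcx : ¬ c = x := fun h => hxc h.symm
                  simp [hcx, bne_iff_ne, hxc])).symm
            · -- b < c ≤ every later element: b is a singleton
              have hbc : b < c := lt_of_le_of_ne (List.rel_of_pairwise_cons hp (by simp)) (Ne.symm hcb)
              have h2 := (ih t ht).1 c hp.tail
              have hble : ∀ x ∈ c :: t, c ≤ x := by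
                intro x hx
                rcases List.mem_cons.mp hx with rfl | hm
                · exact le_refl x
                · exact List.rel_of_pairwise_cons hp.tail hm
              have hbnot : b ∉ c :: t := fun hmem =>
                absurd (lt_of_lt_of_le hbc (hble b hmem)) (lt_irrefl b)
              simp only [nnScan, show ((some b == some c)) = false by simp [Ne.symm hcb], Bool.false_eq_true,
                if_false, if_true, Option.toList_some]
              rw [h2]
              have hpb : ((b :: c :: t).count b == 1) = true := by
                simp [List.count_eq_zero_of_not_mem hbnot]
              have e2 : (c :: t).filter (fun x => (b :: c :: t).count x == 1)
                  = (c :: t).filter (fun x => (c :: t).count x == 1) := by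
                apply List.filter_congr
                intro x hx
                have hxb : ¬ b = x := fun h => hbnot (h ▸ hx)
                simp [List.count_cons, hxb]
              rw [show List.filter (fun x => List.count x (b :: c :: t) == 1) (b :: c :: t)
                    = b :: List.filter (fun x => List.count x (b :: c :: t) == 1) (c :: t)
                  from List.filter_cons_of_pos (by exact hpb), e2]
              simp
      · -- M3 : 'single' is false, 'last' = a whose run had length ≥ 2
        intro a hp
        cases l with
        | nil => simp [nnScan]
        | cons c t =>
            have ht : t.length ≤ n := by simp only [List.length_cons] at hl; omega
            by_cases hca : c = a
            · subst hca
              have h3 := (ih t ht).2 c hp.tail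
              simp only [nnScan, beq_self_eq_true, if_true]
              rw [h3]
              rw [List.filter_cons_of_neg (by simp)]
              exact (List.filter_congr (fun x hx => by
                by_cases hxc : x = c
                · subst hxc; simp
                · have hcx : ¬ c = x := fun h => hxc h.symm
                  simp [hcx])).symm
            · have hac : a < c := lt_of_le_of_ne (List.rel_of_pairwise_cons hp (by simp)) (Ne.symm hca)
              have h2 := (ih t ht).1 c hp.tail
              simp only [nnScan, show ((some a == some c)) = false by simp [Ne.symm hca],
                Bool.false_eq_true, if_false, List.nil_append]
              rw [h2]
              apply List.filter_congr
              intro x hx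
              have hxa : x ≠ a := by
                intro h; subst h
                rcases List.mem_cons.mp hx with h | hm
                · exact hca h.symm
                · exact absurd (List.rel_of_pairwise_cons hp.tail hm) (not_le_of_gt hac)
              simp [bne_iff_ne, hxa]

theorem nnScan_top (l : List Char) (hp : List.Pairwise (· ≤ ·) l) :
    nnScan none false l = l.filter (fun c => l.count c == 1) := by
  cases l with
  | nil => simp [nnScan]
  | cons b t =>
      simp only [nnScan, show ((none : Option Char) == some b) = false from rfl,
        Bool.false_eq_true, if_false, List.nil_append]
      exact (nnScan_main t.length t le_rfl).1 b hp

-- the singleton characters of any list form a Nodup list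
theorem filter_count_one_nodup (l : List Char) :
    (l.filter (fun c => l.count c == 1)).Nodup := by
  rw [List.nodup_iff_count_le_one]
  intro a
  by_cases h : (l.count a == 1) = true
  · calc List.count a (l.filter (fun c => l.count c == 1)) ≤ l.count a :=
          List.Sublist.count_le a List.filter_sublist
      _ ≤ 1 := by simpa using (beq_iff_eq.mp h).le
  · have hnm : a ∉ l.filter (fun c => l.count c == 1) := by
      intro hmem; exact h (List.mem_filter.mp hmem).2
    simp [List.count_eq_zero_of_not_mem hnm]

-- ===== VERDICT (by name: the statement is the Claim_ definition above) =====
theorem normalize_notation_spec : Claim_equal_normalize_notation := by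
  intro s _
  unfold Spec_normalize_notation normalize_notation normalize_notation_alt
  by_cases hin : PySem.Str.isIn "->" s
  · rw [if_neg (by rw [hin]; simp), if_pos hin]
  · have hf : PySem.Str.isIn "->" s = false := by simpa using hin
    rw [if_pos hf, if_neg (by rw [hf]; simp)]
    dsimp only []
    refine congrArg String.ofList (congrArg (fun l => s.toList ++ '-' :: '>' :: l) ?_)
    set allc := (PySem.Str.join "" ((PySem.Str.split? s ",").getD [])).toList with hallc
    set chars := PySem.List.sorted allc (fun c => c) false with hchars
    have hpair : List.Pairwise (· ≤ ·) chars := PySem.List.sorted_pairwise allc (fun c => c)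
    have hperm : chars.Perm allc := PySem.List.sorted_perm allc (fun c => c) false
    -- B's side computes the singleton characters of the sorted list
    have hB := foldl_nnStep chars [] none false
    rw [List.nil_append, nnScan_top chars hpair] at hB
    rw [hB]
    -- A's side: rewrite the Counter lookups into plain counts
    have hfa : (PySem.Dict.counter allc).keys.filter (fun c => (PySem.Dict.counter allc).getD c 0 == 1)
        = (PySem.Set.ofList allc : List Char).filter (fun c => allc.count c == 1) := by
      rw [PySem.Dict.keys_counter]
      apply List.filter_congr
      intro x _
      simp [PySem.Dict.getD_counter, Nat.cast_eq_one]
    rw [hfa]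
    -- sorted (singleton members of allc) = singleton filter of the sorted list
    apply PySem.List.sorted_eq_of_perm_of_pairwise_lt
    · rw [List.perm_ext_iff_of_nodup (filter_count_one_nodup chars)
        (List.Nodup.filter _ (PySem.Set.nodup_ofList allc))]
      intro a
      have hcount : chars.count a = allc.count a := hperm.count_eq a
      simp only [List.mem_filter, PySem.Set.mem_ofList, hcount]
      constructor
      · rintro ⟨hm, hc⟩
        exact ⟨hperm.mem_iff.mp hm, hc⟩
      · rintro ⟨hm, hc⟩
        exact ⟨hperm.mem_iff.mpr hm, hc⟩
    · have hle : (chars.filter (fun c => chars.count c == 1)).SortedLE :=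
        List.sortedLE_iff_pairwise.mpr (hpair.sublist List.filter_sublist)
      exact List.sortedLT_iff_pairwise.mp (hle.sortedLT_of_nodup (filter_count_one_nodup chars))
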